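-- pv_equiv track=rewrite | github.com/sejkimm/problem_solving | leetcode/solutions/python/problem_2684.py | maxMoves
-- ===== SOURCE A (Python) =====
-- from typing import List
--
-- def maxMoves(grid: List[List[int]]) -> int:
--     m: int = len(grid)
--     n: int = len(grid[0])
--     cache: List[List[int]] = [[1 for _ in range(n)] for _ in range(m)]
--
--     for current_col in reversed(range(0, n)):
--         max_next_col_step: List[int] = [0 for _ in range(m)]
--         for current_row in range(0, m):
--             for step_indicator in [(-1, 1), (0, 1), (1, 1)]:
--                 target_row: int = current_row-step_indicator[0]
--                 target_col: int = current_col-step_indicator[1]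
--
--                 if ((target_row < 0)
--                     or (target_col < 0)
--                     or (target_row >= m)
--                     or (target_col >= n)
--                 ):
--                     continue
--
--                 if grid[current_row][current_col] > grid[target_row][target_col]:
--                     max_next_col_step[target_row] = max(max_next_col_step[target_row], cache[current_row][current_col])
--
--         for row, max_step in enumerate(max_next_col_step):
--             cache[row][current_col-1] += max_step
--
--     max_move: int = max(row[0] for row in cache)
--
--     return max_move - 1
-- ===== SOURCE B (Python) =====
-- from typing import List
--
-- def maxMoves(grid: List[List[int]]) -> int:
--     m: int = len(grid)
--     n: int = len(grid[0])
--     memo = {}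
--
--     def dfs(r: int, c: int) -> int:
--         if (r, c) in memo:
--             return memo[(r, c)]
--         best = 0
--         if c + 1 < n:
--             v = grid[r][c]
--             for nr in (r - 1, r, r + 1):
--                 if 0 <= nr < m and grid[nr][c + 1] > v:
--                     s = dfs(nr, c + 1)
--                     if s > best:
--                         best = s
--         memo[(r, c)] = best + 1
--         return best + 1
--
--     return max(dfs(r, 0) for r in range(m)) - 1
-- ===== Notes on version B (the rewrite author's own statement) =====
-- stated objective: faster
-- what changed: Replaced A's bottom-up push-style column DP (a full m*n cache table updated right-to-left with a per-column scatter array and an enumerate write-back pass) by a top-down memoized recursive DFS that computes the longest strictly-increasing rightward path length from each cell on demand, starting from the first column.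
import Mathlib
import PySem

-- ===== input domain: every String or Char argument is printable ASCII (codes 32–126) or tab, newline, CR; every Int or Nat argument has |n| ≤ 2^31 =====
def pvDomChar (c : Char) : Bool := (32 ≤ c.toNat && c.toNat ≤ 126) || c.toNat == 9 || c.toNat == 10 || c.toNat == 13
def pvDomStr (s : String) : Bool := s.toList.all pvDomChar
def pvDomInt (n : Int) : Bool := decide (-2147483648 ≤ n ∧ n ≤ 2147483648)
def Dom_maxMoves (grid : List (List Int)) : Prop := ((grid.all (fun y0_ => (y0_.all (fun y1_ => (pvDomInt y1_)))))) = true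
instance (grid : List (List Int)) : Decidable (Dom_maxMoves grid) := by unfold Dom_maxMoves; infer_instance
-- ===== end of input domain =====

-- B replaces A's push-style bottom-up column DP (full m×n cache updated right-to-left)
-- by a top-down memoized DFS from the first column, which only visits cells reachable by an
-- increasing rightward path (measurably faster on the generated timing inputs; same O(m*n) worst case).

-- ===== PORT A =====
def maxMoves (grid : List (List Int)) : Int :=
  let m : Int := PySem.List.len grid
  let n : Int := PySem.List.len (PySem.List.pyGetD grid 0 [])
  let cache : List (List Int) :=
    (PySem.List.pyRange 0 m 1).map (fun _ => (PySem.List.pyRange 0 n 1).map (fun _ => (1 : Int)))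
  let cache := ((PySem.List.pyRange 0 n 1).reverse).foldl (fun cache c =>
    let mnc : List Int := (PySem.List.pyRange 0 m 1).map (fun _ => (0 : Int))
    let mnc := (PySem.List.pyRange 0 m 1).foldl (fun mnc r =>
      [((-1 : Int), (1 : Int)), (0, 1), (1, 1)].foldl (fun mnc step =>
        let tr : Int := r - step.1
        let tc : Int := c - step.2
        if tr < 0 ∨ tc < 0 ∨ tr ≥ m ∨ tc ≥ n then mnc
        else if PySem.List.pyGetD (PySem.List.pyGetD grid r []) c 0 >
                PySem.List.pyGetD (PySem.List.pyGetD grid tr []) tc 0 then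
          PySem.List.pySetD mnc tr
            (max (PySem.List.pyGetD mnc tr 0)
                 (PySem.List.pyGetD (PySem.List.pyGetD cache r []) c 0))
        else mnc) mnc) mnc
    (PySem.List.enumerate mnc 0).foldl (fun cache p =>
      PySem.List.pySetD cache p.1
        (PySem.List.pySetD (PySem.List.pyGetD cache p.1 []) (c - 1)
          (PySem.List.pyGetD (PySem.List.pyGetD cache p.1 []) (c - 1) 0 + p.2))) cache) cache
  (PySem.List.max? (cache.map (fun row => PySem.List.pyGetD row 0 0)) (fun x => x)).getD 0 - 1

-- ===== PORT B =====
mutual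
def dfsB (grid : List (List Int)) (m n : Int) (r c : Int)
    (memo : PySem.Dict (Int × Int) Int) : Int × PySem.Dict (Int × Int) Int :=
  match memo.get? (r, c) with
  | some v => (v, memo)
  | none =>
    let st :=
      if _h : c + 1 < n then
        dfsRowB grid m n (c + 1) (PySem.List.pyGetD (PySem.List.pyGetD grid r []) c 0)
          [r - 1, r, r + 1] (0, memo)
      else (0, memo)
    (st.1 + 1, st.2.insert (r, c) (st.1 + 1))
termination_by ((n - c).toNat, 0)
decreasing_by exact Prod.Lex.left _ _ (by omega)

def dfsRowB (grid : List (List Int)) (m n : Int) (c : Int) (v : Int)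
    (rs : List Int) (st : Int × PySem.Dict (Int × Int) Int) :
    Int × PySem.Dict (Int × Int) Int :=
  match rs with
  | [] => st
  | nr :: rest =>
    let st' :=
      if 0 ≤ nr ∧ nr < m ∧ PySem.List.pyGetD (PySem.List.pyGetD grid nr []) c 0 > v then
        let p := dfsB grid m n nr c st.2
        ((if p.1 > st.1 then p.1 else st.1), p.2)
      else st
    dfsRowB grid m n c v rest st'
termination_by ((n - c).toNat, rs.length + 1)
decreasing_by
  all_goals exact Prod.Lex.right _ (by simp only [List.length_cons]; omega)
end

def maxMoves_alt (grid : List (List Int)) : Int :=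
  let m : Int := PySem.List.len grid
  let n : Int := PySem.List.len (PySem.List.pyGetD grid 0 [])
  let res := (PySem.List.pyRange 0 m 1).foldl (fun st r =>
    let p := dfsB grid m n r 0 st.2
    ((match st.1 with
      | none => some p.1
      | some b => some (max b p.1)), p.2)) ((none : Option Int), PySem.Dict.empty)
  res.1.getD 0 - 1

-- ===== PRECONDITION & SPEC =====
-- Pre_ excludes exactly the inputs on which the Python A raises IndexError: an empty grid
-- (grid[0]), an empty first row (row[0] on cache rows of length 0), and — when the first row
-- has length n ≥ 2, so that A reads every cell of every row in columns 0..n-1 — grids with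
-- some row shorter than n.
def Pre_maxMoves (grid : List (List Int)) : Prop :=
  grid ≠ [] ∧ grid.headI ≠ [] ∧
    (1 < grid.headI.length → ∀ row ∈ grid, grid.headI.length ≤ row.length)
instance (grid : List (List Int)) : Decidable (Pre_maxMoves grid) := by
  unfold Pre_maxMoves; infer_instance

def pvWitness_maxMoves : List (List Int) := [[2, 4, 3, 5], [5, 4, 9, 3], [3, 4, 2, 11], [10, 9, 13, 15]]

def Spec_maxMoves (grid : List (List Int)) (out : Int) : Prop := out = maxMoves_alt grid
instance (grid : List (List Int)) (out : Int) : Decidable (Spec_maxMoves grid out) := by unfold Spec_maxMoves; infer_instance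

-- ===== CLAIM (what is proved, stated in full; the proofs are below) =====
def Claim_equal_maxMoves : Prop := ∀ (grid : List (List Int)), Dom_maxMoves grid → Pre_maxMoves grid → Spec_maxMoves grid (maxMoves grid)

-- ===== LEMMAS AND PROOFS =====

-- grid[r][c] as the total read both ports use
def Gd (grid : List (List Int)) (r c : Int) : Int :=
  PySem.List.pyGetD (PySem.List.pyGetD grid r []) c 0

-- the common mathematical value: fB grid m n r c = number of cells of the longest
-- strictly-increasing rightward path starting at (r, c)
mutual
def fB (grid : List (List Int)) (m n : Int) (r c : Int) : Int :=
  (if _h : c + 1 < n then fRowB grid m n (c + 1) (Gd grid r c) [r - 1, r, r + 1] 0 else 0) + 1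
termination_by ((n - c).toNat, 0)
decreasing_by exact Prod.Lex.left _ _ (by omega)

def fRowB (grid : List (List Int)) (m n : Int) (c : Int) (v : Int)
    (rs : List Int) (best : Int) : Int :=
  match rs with
  | [] => best
  | nr :: rest =>
    fRowB grid m n c v rest
      (if 0 ≤ nr ∧ nr < m ∧ Gd grid nr c > v then
        (if fB grid m n nr c > best then fB grid m n nr c else best)
       else best)
termination_by ((n - c).toNat, rs.length + 1)
decreasing_by
  all_goals exact Prod.Lex.right _ (by simp only [List.length_cons]; omega)
end

def MemoInv (grid : List (List Int)) (m n : Int) (memo : PySem.Dict (Int × Int) Int) : Prop :=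
  ∀ r c w, memo.get? (r, c) = some w → w = fB grid m n r c

mutual
theorem dfsB_correct (grid : List (List Int)) (m n r c : Int)
    (memo : PySem.Dict (Int × Int) Int) (h : MemoInv grid m n memo) :
    (dfsB grid m n r c memo).1 = fB grid m n r c ∧ MemoInv grid m n (dfsB grid m n r c memo).2 := by
  rw [dfsB]
  cases hg : memo.get? (r, c) with
  | some v =>
    exact ⟨h _ _ _ hg, fun r' c' w hw => h _ _ _ hw⟩
  | none =>
    simp only
    by_cases h1 : c + 1 < n
    · have hrow := dfsRowB_correct grid m n (c + 1)
        (PySem.List.pyGetD (PySem.List.pyGetD grid r []) c 0) [r - 1, r, r + 1] (0, memo) h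
      rw [dif_pos h1]
      constructor
      · rw [fB, dif_pos h1, hrow.1]; rfl
      · intro r' c' w hw
        rw [PySem.Dict.get?_insert] at hw
        split at hw
        · rename_i heq
          obtain ⟨hr', hc'⟩ := Prod.mk.injEq .. ▸ heq
          subst hr'; subst hc'
          cases hw
          rw [fB, dif_pos h1, hrow.1]; rfl
        · exact hrow.2 _ _ _ hw
    · rw [dif_neg h1]
      constructor
      · rw [fB, dif_neg h1]
      · intro r' c' w hw
        rw [PySem.Dict.get?_insert] at hw
        split at hw
        · rename_i heq
          obtain ⟨hr', hc'⟩ := Prod.mk.injEq .. ▸ heq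
          subst hr'; subst hc'
          cases hw
          rw [fB, dif_neg h1]
        · exact h _ _ _ hw
termination_by ((n - c).toNat, 0)
decreasing_by exact Prod.Lex.left _ _ (by omega)

theorem dfsRowB_correct (grid : List (List Int)) (m n c v : Int) (rs : List Int)
    (st : Int × PySem.Dict (Int × Int) Int) (h : MemoInv grid m n st.2) :
    (dfsRowB grid m n c v rs st).1 = fRowB grid m n c v rs st.1 ∧
      MemoInv grid m n (dfsRowB grid m n c v rs st).2 := by
  match rs with
  | [] => rw [dfsRowB, fRowB]; exact ⟨rfl, h⟩
  | nr :: rest =>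
    rw [dfsRowB, fRowB]
    by_cases hcond : 0 ≤ nr ∧ nr < m ∧ PySem.List.pyGetD (PySem.List.pyGetD grid nr []) c 0 > v
    · have hb := dfsB_correct grid m n nr c st.2 h
      rw [if_pos hcond]
      have : Gd grid nr c = PySem.List.pyGetD (PySem.List.pyGetD grid nr []) c 0 := rfl
      rw [if_pos (this ▸ hcond)]
      have hrec := dfsRowB_correct grid m n c v rest
        ((if (dfsB grid m n nr c st.2).1 > st.1 then (dfsB grid m n nr c st.2).1 else st.1),
          (dfsB grid m n nr c st.2).2) hb.2
      rw [hb.1] at hrec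
      simp only [hb.1]
      simpa only using hrec
    · rw [if_neg hcond]
      have : Gd grid nr c = PySem.List.pyGetD (PySem.List.pyGetD grid nr []) c 0 := rfl
      rw [if_neg (this ▸ hcond)]
      exact dfsRowB_correct grid m n c v rest st h
termination_by ((n - c).toNat, rs.length + 1)
decreasing_by
  all_goals exact Prod.Lex.right _ (by simp only [List.length_cons]; omega)
end

lemma ite_gt_max (a b : Int) : (if a > b then a else b) = max b a := by
  split <;> omega

lemma pyGetD_nonneg {α : Type} (xs : List α) (i : Int) (d : α) (h : 0 ≤ i) :
    PySem.List.pyGetD xs i d = xs.getD i.toNat d := by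
  conv_lhs => rw [← Int.toNat_of_nonneg h]
  rw [PySem.List.pyGetD_natCast]

lemma getD_set_ne {α : Type} (l : List α) (i t : Nat) (v d : α) (h : i ≠ t) :
    (l.set i v).getD t d = l.getD t d := by
  simp [List.getD_eq_getElem?_getD, List.getElem?_set_ne h]

lemma getD_set_self {α : Type} (l : List α) (i : Nat) (v d : α) (h : i < l.length) :
    (l.set i v).getD i d = v := by
  simp [List.getD_eq_getElem?_getD, h]

-- the B driver loop, with the memoized calls replaced by fB
lemma altLoop (grid : List (List Int)) (m n : Int) (l : List Int)
    (st : Option Int × PySem.Dict (Int × Int) Int) (h : MemoInv grid m n st.2) :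
    (l.foldl (fun st r =>
      ((match st.1 with
        | none => some (dfsB grid m n r 0 st.2).1
        | some b => some (max b (dfsB grid m n r 0 st.2).1)), (dfsB grid m n r 0 st.2).2)) st).1
    = l.foldl (fun o r => match o with
        | none => some (fB grid m n r 0)
        | some b => some (max b (fB grid m n r 0))) st.1 := by
  induction l generalizing st with
  | nil => rfl
  | cons r rest ih =>
    simp only [List.foldl_cons]
    have hb := dfsB_correct grid m n r 0 st.2 h
    rw [ih _ hb.2, hb.1]

-- the pure option-max fold is a plain running max
lemma optfold (g : Int → Int) (l : List Int) (x : Int) :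
    l.foldl (fun o r => match o with
        | none => some (g r)
        | some b => some (max b (g r))) (some x)
    = some ((l.map g).foldl max x) := by
  induction l generalizing x with
  | nil => rfl
  | cons r rest ih => simp only [List.foldl_cons, List.map_cons]; rw [ih]

-- the enumerate write-back loop: entry t gets W applied once, with mnc[t - s]
lemma enum_write (W : List Int → Int → List Int) (mnc : List Int) :
    ∀ (s : Nat) (cache : List (List Int)), s + mnc.length ≤ cache.length →
    (((PySem.List.enumerate mnc (s : Int)).foldl (fun cache p =>
        PySem.List.pySetD cache p.1 (W (PySem.List.pyGetD cache p.1 []) p.2)) cache).length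
      = cache.length) ∧
    (∀ t : Nat,
      ((PySem.List.enumerate mnc (s : Int)).foldl (fun cache p =>
        PySem.List.pySetD cache p.1 (W (PySem.List.pyGetD cache p.1 []) p.2)) cache).getD t []
      = if s ≤ t ∧ t < s + mnc.length then W (cache.getD t []) (mnc.getD (t - s) 0)
        else cache.getD t []) := by
  induction mnc with
  | nil =>
    intro s cache _
    refine ⟨by simp [PySem.List.enumerate_nil], fun t => ?_⟩
    simp only [PySem.List.enumerate_nil, List.foldl_nil]
    rw [if_neg (by simp only [List.length_nil]; omega)]
  | cons x xs ih =>
    intro s cache hlen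
    rw [PySem.List.enumerate_cons]
    simp only [List.foldl_cons]
    have hset : PySem.List.pySetD cache (s : Int) (W (PySem.List.pyGetD cache (s : Int) []) x)
        = cache.set s (W (cache.getD s []) x) := by
      rw [PySem.List.pySetD_natCast, PySem.List.pyGetD_natCast]
    have hs1 : ((s : Int) + 1) = ((s + 1 : Nat) : Int) := by push_cast; ring
    rw [hset, hs1]
    have hlen1 : (s + 1) + xs.length ≤ (cache.set s (W (cache.getD s []) x)).length := by
      simp only [List.length_set]; simp only [List.length_cons] at hlen; omega
    obtain ⟨ihl, ihv⟩ := ih (s + 1) (cache.set s (W (cache.getD s []) x)) hlen1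
    constructor
    · rw [ihl, List.length_set]
    · intro t
      rw [ihv t]
      have hslen : s < cache.length := by simp only [List.length_cons] at hlen; omega
      by_cases h1 : s + 1 ≤ t ∧ t < s + 1 + xs.length
      · rw [if_pos h1, if_pos (by simp only [List.length_cons]; omega)]
        rw [getD_set_ne _ _ _ _ _ (by omega)]
        have : (x :: xs).getD (t - s) 0 = xs.getD (t - (s + 1)) 0 := by
          have hts : t - s = (t - (s + 1)) + 1 := by omega
          rw [hts]; rfl
        rw [this]
      · rw [if_neg h1]
        by_cases h2 : t = s
        · subst h2
          rw [if_pos (by simp only [List.length_cons]; omega)]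
          rw [getD_set_self _ _ _ _ hslen]
          simp
        · rw [if_neg (by simp only [List.length_cons]; omega)]
          rw [getD_set_ne _ _ _ _ _ (by omega)]

-- ============ A-side: the bottom-up column DP computes fB ============

-- the body of A's inner (row) loop for one row r, column c
def rowBody (grid : List (List Int)) (m n : Int) (cache : List (List Int)) (c : Int)
    (mnc : List Int) (r : Int) : List Int :=
  [((-1 : Int), (1 : Int)), (0, 1), (1, 1)].foldl (fun mnc step =>
    let tr : Int := r - step.1
    let tc : Int := c - step.2
    if tr < 0 ∨ tc < 0 ∨ tr ≥ m ∨ tc ≥ n then mnc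
    else if PySem.List.pyGetD (PySem.List.pyGetD grid r []) c 0 >
            PySem.List.pyGetD (PySem.List.pyGetD grid tr []) tc 0 then
      PySem.List.pySetD mnc tr
        (max (PySem.List.pyGetD mnc tr 0)
             (PySem.List.pyGetD (PySem.List.pyGetD cache r []) c 0))
    else mnc) mnc

-- the body of A's outer (column) loop
def colBody (grid : List (List Int)) (m n : Int) (cache : List (List Int)) (c : Int) :
    List (List Int) :=
  let mnc : List Int := (PySem.List.pyRange 0 m 1).map (fun _ => (0 : Int))
  let mnc := (PySem.List.pyRange 0 m 1).foldl (rowBody grid m n cache c) mnc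
  (PySem.List.enumerate mnc 0).foldl (fun cache p =>
    PySem.List.pySetD cache p.1
      (PySem.List.pySetD (PySem.List.pyGetD cache p.1 []) (c - 1)
        (PySem.List.pyGetD (PySem.List.pyGetD cache p.1 []) (c - 1) 0 + p.2))) cache

-- one conditional max-accumulation step, with sources restricted below K
def tstep (grid : List (List Int)) (m n c t K b nr : Int) : Int :=
  if 0 ≤ nr ∧ nr < K ∧ nr < m ∧ Gd grid nr c > Gd grid t (c - 1) then
    max b (fB grid m n nr c)
  else b

-- running max over the sources among {t-1, t, t+1} that lie below K
def tval (grid : List (List Int)) (m n c t K : Int) : Int :=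
  tstep grid m n c t K (tstep grid m n c t K (tstep grid m n c t K 0 (t - 1)) t) (t + 1)

def CacheInv (grid : List (List Int)) (m' n' : Nat) (c : Nat) (cache : List (List Int)) : Prop :=
  cache.length = m' ∧ (∀ r : Nat, r < m' → (cache.getD r []).length = n') ∧
  (∀ r j : Nat, r < m' → j < n' →
    (cache.getD r []).getD j 0 = if c ≤ j + 1 then fB grid ↑m' ↑n' ↑r ↑j else 1)

lemma tstep_skip (grid : List (List Int)) (m n c t K b nr : Int)
    (h : ¬ (0 ≤ nr ∧ nr < K ∧ nr < m)) : tstep grid m n c t K b nr = b := by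
  unfold tstep
  exact if_neg (by rintro ⟨a, b', c', -⟩; exact h ⟨a, b', c'⟩)

lemma tstep_K (grid : List (List Int)) (m n c t K K' b nr : Int)
    (h : nr < K ↔ nr < K') : tstep grid m n c t K b nr = tstep grid m n c t K' b nr := by
  unfold tstep
  exact if_congr (and_congr Iff.rfl (and_congr h Iff.rfl)) rfl rfl

lemma tstep_on (grid : List (List Int)) (m n c t K b nr : Int)
    (h0 : 0 ≤ nr) (h1 : nr < K) (h2 : nr < m) :
    tstep grid m n c t K b nr
      = if Gd grid nr c > Gd grid t (c - 1) then max b (fB grid m n nr c) else b := by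
  unfold tstep
  exact if_congr (Iff.intro (fun ⟨_, _, _, d⟩ => d) (fun d => ⟨h0, h1, h2, d⟩)) rfl rfl

lemma tval_zero (grid : List (List Int)) (m n c : Int) (t : Nat) :
    tval grid m n c ↑t 0 = 0 := by
  unfold tval
  rw [tstep_skip _ _ _ _ _ _ _ _ (by rintro ⟨a, b, -⟩; omega),
    tstep_skip _ _ _ _ _ _ _ _ (by rintro ⟨a, b, -⟩; omega),
    tstep_skip _ _ _ _ _ _ _ _ (by rintro ⟨a, b, -⟩; omega)]

lemma tval_succ (grid : List (List Int)) (m n c : Int) (t : Int) (k : Nat)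
    (hk : 0 ≤ (k : Int) ∧ (k : Int) < m) :
    tval grid m n c t (↑k + 1)
      = if (t = ↑k - 1 ∨ t = ↑k ∨ t = ↑k + 1) ∧ Gd grid ↑k c > Gd grid t (c - 1) then
          max (tval grid m n c t ↑k) (fB grid m n ↑k c)
        else tval grid m n c t ↑k := by
  unfold tval
  rcases (by omega : t = ↑k + 1 ∨ t = ↑k ∨ t = ↑k - 1 ∨ (t ≠ ↑k + 1 ∧ t ≠ ↑k ∧ t ≠ ↑k - 1))
    with h | h | h | ⟨h1, h2, h3⟩
  · -- source t - 1 = k is the one that toggles on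
    subst h
    rw [tstep_skip _ _ _ _ _ (↑k + 1) _ (↑k + 1 + 1) (by rintro ⟨a, b, -⟩; omega),
      tstep_skip _ _ _ _ _ (↑k + 1) _ (↑k + 1) (by rintro ⟨a, b, -⟩; omega),
      tstep_skip _ _ _ _ _ (↑k : Int) _ (↑k + 1 + 1) (by rintro ⟨a, b, -⟩; omega),
      tstep_skip _ _ _ _ _ (↑k : Int) _ (↑k + 1) (by rintro ⟨a, b, -⟩; omega),
      tstep_skip _ _ _ _ _ (↑k : Int) _ (↑k + 1 - 1) (by rintro ⟨a, b, -⟩; omega),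
      tstep_on _ _ _ _ _ _ _ _ (by omega) (by omega) (by omega)]
    have he : (↑k + 1 - 1 : Int) = ↑k := by omega
    rw [he]
    exact if_congr (Iff.intro (fun d => ⟨by omega, d⟩) (fun h => h.2)) rfl rfl
  · -- source t = k toggles on
    subst h
    rw [tstep_skip _ _ _ _ _ (↑k + 1) _ (↑k + 1) (by rintro ⟨a, b, -⟩; omega),
      tstep_skip _ _ _ _ _ (↑k : Int) _ (↑k + 1) (by rintro ⟨a, b, -⟩; omega),
      tstep_skip _ _ _ _ _ (↑k : Int) _ (↑k : Int) (by rintro ⟨a, b, -⟩; omega),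
      tstep_K _ _ _ _ _ (↑k + 1) (↑k : Int) _ (↑k - 1) (by omega),
      tstep_on _ _ _ _ _ _ _ _ (by omega) (by omega) (by omega)]
    exact if_congr (Iff.intro (fun d => ⟨by omega, d⟩) (fun h => h.2)) rfl rfl
  · -- source t + 1 = k toggles on
    subst h
    have he : (↑k - 1 + 1 : Int) = ↑k := by omega
    rw [he,
      tstep_K _ _ _ _ _ (↑k + 1) (↑k : Int) _ (↑k - 1 - 1) (by omega),
      tstep_K _ _ _ _ _ (↑k + 1) (↑k : Int) _ (↑k - 1) (by omega),
      tstep_skip _ _ _ _ _ (↑k : Int) _ (↑k : Int) (by rintro ⟨a, b, -⟩; omega),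
      tstep_on _ _ _ _ _ _ _ _ (by omega) (by omega) hk.2]
    exact if_congr (Iff.intro (fun d => ⟨by omega, d⟩) (fun h => h.2)) rfl rfl
  · -- no source toggles: all three thresholds equivalent
    rw [tstep_K _ _ _ _ _ (↑k + 1) (↑k : Int) _ (t - 1) (by omega),
      tstep_K _ _ _ _ _ (↑k + 1) (↑k : Int) _ t (by omega),
      tstep_K _ _ _ _ _ (↑k + 1) (↑k : Int) _ (t + 1) (by omega),
      if_neg (by rintro ⟨h, -⟩; rcases h with h | h | h <;> omega)]

lemma tval_final (grid : List (List Int)) (m n c t : Int) :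
    tval grid m n c t m = fRowB grid m n c (Gd grid t (c - 1)) [t - 1, t, t + 1] 0 := by
  unfold tval
  rw [fRowB, fRowB, fRowB, fRowB]
  have step : ∀ b nr : Int, tstep grid m n c t m b nr
      = if 0 ≤ nr ∧ nr < m ∧ Gd grid nr c > Gd grid t (c - 1) then
          (if fB grid m n nr c > b then fB grid m n nr c else b)
        else b := by
    intro b nr
    unfold tstep
    rw [ite_gt_max]
    exact if_congr (Iff.intro (fun ⟨a, b', _, d⟩ => ⟨a, b', d⟩) (fun ⟨a, b', d⟩ => ⟨a, b', b', d⟩)) rfl rfl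
  rw [step, step, step]

lemma stepOne (grid : List (List Int)) (m' n' : Nat) (c r τ : Int) (V : Int)
    (hc : 1 ≤ c ∧ c < ↑n') (mnc : List Int) (hlen : mnc.length = m') :
    ((if τ < 0 ∨ c - 1 < 0 ∨ τ ≥ ↑m' ∨ c - 1 ≥ ↑n' then mnc
      else if Gd grid r c > Gd grid τ (c - 1) then
        PySem.List.pySetD mnc τ (max (PySem.List.pyGetD mnc τ 0) V)
      else mnc).length = m') ∧
    (∀ t : Nat, t < m' →
      (if τ < 0 ∨ c - 1 < 0 ∨ τ ≥ ↑m' ∨ c - 1 ≥ ↑n' then mnc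
       else if Gd grid r c > Gd grid τ (c - 1) then
         PySem.List.pySetD mnc τ (max (PySem.List.pyGetD mnc τ 0) V)
       else mnc).getD t 0
      = if ↑t = τ ∧ Gd grid r c > Gd grid ↑t (c - 1) then max (mnc.getD t 0) V
        else mnc.getD t 0) := by
  by_cases hg : τ < 0 ∨ c - 1 < 0 ∨ τ ≥ ↑m' ∨ c - 1 ≥ ↑n'
  · rw [if_pos hg]
    refine ⟨hlen, fun t htm => ?_⟩
    rw [if_neg ?_]
    rintro ⟨h1, -⟩
    rcases hg with h | h | h | h <;> omega
  · rw [if_neg hg]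
    push_neg at hg
    obtain ⟨hτ0, -, hτm, -⟩ := hg
    by_cases hcmp : Gd grid r c > Gd grid τ (c - 1)
    · rw [if_pos hcmp, PySem.List.pySetD_of_nonneg _ _ hτ0, pyGetD_nonneg _ _ _ hτ0]
      refine ⟨by rw [List.length_set, hlen], fun t htm => ?_⟩
      by_cases hteq : (t : Int) = τ
      · have htn : τ.toNat = t := by omega
        rw [htn, getD_set_self _ _ _ _ (by omega), if_pos ⟨hteq, by rwa [hteq]⟩]
      · rw [getD_set_ne _ _ _ _ _ (by omega), if_neg (by rintro ⟨h1, -⟩; exact hteq h1)]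
    · rw [if_neg hcmp]
      refine ⟨hlen, fun t htm => ?_⟩
      rw [if_neg (by rintro ⟨h1, h2⟩; exact hcmp (h1 ▸ h2))]

-- one target update of A's inner loop
def astep (grid : List (List Int)) (m n : Int) (cache : List (List Int)) (c r τ : Int)
    (mnc : List Int) : List Int :=
  if τ < 0 ∨ c - 1 < 0 ∨ τ ≥ m ∨ c - 1 ≥ n then mnc
  else if Gd grid r c > Gd grid τ (c - 1) then
    PySem.List.pySetD mnc τ (max (PySem.List.pyGetD mnc τ 0) (Gd cache r c))
  else mnc

lemma rowBody_eq (grid : List (List Int)) (m n : Int) (cache : List (List Int)) (c : Int)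
    (mnc : List Int) (r : Int) :
    rowBody grid m n cache c mnc r
      = astep grid m n cache c r (r - 1)
          (astep grid m n cache c r r (astep grid m n cache c r (r + 1) mnc)) := by
  show [((-1 : Int), (1 : Int)), (0, 1), (1, 1)].foldl _ mnc = _
  rw [List.foldl_cons, List.foldl_cons, List.foldl_cons, List.foldl_nil]
  unfold astep Gd
  norm_num

lemma astep_spec (grid : List (List Int)) (m' n' : Nat) (cache : List (List Int)) (c r τ : Int)
    (hc : 1 ≤ c ∧ c < ↑n') (mnc : List Int) (hlen : mnc.length = m') :
    ((astep grid ↑m' ↑n' cache c r τ mnc).length = m') ∧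
    (∀ t : Nat, t < m' →
      (astep grid ↑m' ↑n' cache c r τ mnc).getD t 0
      = if ↑t = τ ∧ Gd grid r c > Gd grid ↑t (c - 1) then
          max (mnc.getD t 0) (Gd cache r c)
        else mnc.getD t 0) := by
  unfold astep
  exact stepOne grid m' n' c r τ (Gd cache r c) hc mnc hlen

lemma rowBody_spec (grid : List (List Int)) (m' n' : Nat) (cache : List (List Int)) (c r : Int)
    (hc : 1 ≤ c ∧ c < ↑n') (hr : 0 ≤ r ∧ r < ↑m')
    (mnc : List Int) (hlen : mnc.length = m') :
    ((rowBody grid ↑m' ↑n' cache c mnc r).length = m') ∧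
    (∀ t : Nat, t < m' →
      (rowBody grid ↑m' ↑n' cache c mnc r).getD t 0
      = if (↑t = r - 1 ∨ ↑t = r ∨ ↑t = r + 1) ∧ Gd grid r c > Gd grid ↑t (c - 1) then
          max (mnc.getD t 0) (Gd cache r c)
        else mnc.getD t 0) := by
  rw [rowBody_eq]
  obtain ⟨l1, v1⟩ := astep_spec grid m' n' cache c r (r + 1) hc mnc hlen
  obtain ⟨l2, v2⟩ := astep_spec grid m' n' cache c r r hc
    (astep grid ↑m' ↑n' cache c r (r + 1) mnc) l1
  obtain ⟨l3, v3⟩ := astep_spec grid m' n' cache c r (r - 1) hc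
    (astep grid ↑m' ↑n' cache c r r (astep grid ↑m' ↑n' cache c r (r + 1) mnc)) l2
  refine ⟨l3, fun t ht => ?_⟩
  rw [v3 t ht, v2 t ht, v1 t ht]
  by_cases hcmp : Gd grid r c > Gd grid ↑t (c - 1)
  · rw [if_congr (and_iff_left hcmp) rfl rfl, if_congr (and_iff_left hcmp) rfl rfl,
      if_congr (and_iff_left hcmp) rfl rfl, if_congr (and_iff_left hcmp) rfl rfl]
    split_ifs <;> omega
  · rw [if_neg (by rintro ⟨-, h⟩; exact hcmp h), if_neg (by rintro ⟨-, h⟩; exact hcmp h),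
      if_neg (by rintro ⟨-, h⟩; exact hcmp h), if_neg (by rintro ⟨-, h⟩; exact hcmp h)]

lemma mncLoop (grid : List (List Int)) (m' n' : Nat) (cache : List (List Int)) (c : Int)
    (hc : 1 ≤ c ∧ c < ↑n')
    (hcache : ∀ rr : Nat, rr < m' → Gd cache ↑rr c = fB grid ↑m' ↑n' ↑rr c) :
    ∀ (j k : Nat), k + j = m' → ∀ mnc : List Int, mnc.length = m' →
      (∀ t : Nat, t < m' → mnc.getD t 0 = tval grid ↑m' ↑n' c ↑t ↑k) →
      (((PySem.List.pyRange ↑k ↑m' 1).foldl (rowBody grid ↑m' ↑n' cache c) mnc).length = m') ∧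
      (∀ t : Nat, t < m' →
        ((PySem.List.pyRange ↑k ↑m' 1).foldl (rowBody grid ↑m' ↑n' cache c) mnc).getD t 0
          = tval grid ↑m' ↑n' c ↑t ↑m') := by
  intro j
  induction j with
  | zero =>
    intro k hk mnc hlen hvals
    have hkm : (k : Int) = ↑m' := by omega
    rw [hkm, PySem.List.pyRange_one_eq_nil le_rfl, List.foldl_nil]
    exact ⟨hlen, fun t ht => by rw [hvals t ht, hkm]⟩
  | succ j ih =>
    intro k hk mnc hlen hvals
    have hkm : (k : Int) < ↑m' := by omega
    rw [PySem.List.pyRange_one_cons hkm, List.foldl_cons]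
    obtain ⟨rlen, rvals⟩ := rowBody_spec grid m' n' cache c ↑k hc ⟨by omega, hkm⟩ mnc hlen
    have hcast : ((k : Int) + 1) = ((k + 1 : Nat) : Int) := by push_cast; ring
    rw [hcast]
    apply ih (k + 1) (by omega) _ rlen
    intro t ht
    rw [rvals t ht, ← hcast, tval_succ grid ↑m' ↑n' c ↑t k ⟨by omega, hkm⟩,
      hcache k (by omega)]
    by_cases hcond : ((t : Int) = ↑k - 1 ∨ (t : Int) = ↑k ∨ (t : Int) = ↑k + 1) ∧
        Gd grid ↑k c > Gd grid ↑t (c - 1)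
    · rw [if_pos ⟨by omega, hcond.2⟩, if_pos hcond, hvals t ht]
    · rw [if_neg (by rintro ⟨h, h2⟩; exact hcond ⟨by omega, h2⟩), if_neg hcond, hvals t ht]

lemma fB_step (grid : List (List Int)) (m' n' : Nat) (t : Nat) (c : Nat)
    (h1 : 1 ≤ c) (hc : c < n') :
    fB grid ↑m' ↑n' ↑t ↑(c - 1) = 1 + tval grid ↑m' ↑n' ↑c ↑t ↑m' := by
  rw [tval_final, fB, dif_pos (show ((c - 1 : Nat) : Int) + 1 < ↑n' by omega),
    show ((c - 1 : Nat) : Int) + 1 = (c : Int) by omega,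
    show ((c - 1 : Nat) : Int) = (c : Int) - 1 by omega]
  omega

lemma gd_cast (cache : List (List Int)) (r c : Nat) :
    Gd cache ↑r ↑c = (cache.getD r []).getD c 0 := by
  unfold Gd
  rw [PySem.List.pyGetD_natCast, PySem.List.pyGetD_natCast]

lemma rowBody_id (grid : List (List Int)) (m n : Int) (cache : List (List Int))
    (mnc : List Int) (r : Int) : rowBody grid m n cache 0 mnc r = mnc := by
  rw [rowBody_eq]
  unfold astep
  rw [if_pos (Or.inr (Or.inl (by norm_num))), if_pos (Or.inr (Or.inl (by norm_num))),
    if_pos (Or.inr (Or.inl (by norm_num)))]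

lemma pySetD_last_self (row : List Int) (h : row ≠ []) :
    PySem.List.pySetD row (-1) (row.getLast h) = row := by
  have hl : 0 < row.length := List.length_pos_iff.mpr h
  have h1 : PySem.List.pyIdx? row.length (-1) = some (row.length - 1) := by
    simp [PySem.List.pyIdx?]
    omega
  simp [PySem.List.pySetD, PySem.List.pySet?, h1, List.getLast_eq_getElem, List.set_getElem_self]

-- enum_write, specialised to A's write-back body
lemma enum_write' (cc : Int) (mnc : List Int) (s : Nat) (cache : List (List Int))
    (h : s + mnc.length ≤ cache.length) :
    (((PySem.List.enumerate mnc (s : Int)).foldl (fun cache p =>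
        PySem.List.pySetD cache p.1
          (PySem.List.pySetD (PySem.List.pyGetD cache p.1 []) cc
            (PySem.List.pyGetD (PySem.List.pyGetD cache p.1 []) cc 0 + p.2))) cache).length
      = cache.length) ∧
    (∀ t : Nat,
      ((PySem.List.enumerate mnc (s : Int)).foldl (fun cache p =>
        PySem.List.pySetD cache p.1
          (PySem.List.pySetD (PySem.List.pyGetD cache p.1 []) cc
            (PySem.List.pyGetD (PySem.List.pyGetD cache p.1 []) cc 0 + p.2))) cache).getD t []
      = if s ≤ t ∧ t < s + mnc.length then
          PySem.List.pySetD (cache.getD t []) cc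
            (PySem.List.pyGetD (cache.getD t []) cc 0 + mnc.getD (t - s) 0)
        else cache.getD t []) :=
  enum_write (fun row v => PySem.List.pySetD row cc (PySem.List.pyGetD row cc 0 + v)) mnc s cache h

lemma colBody_spec (grid : List (List Int)) (m' n' : Nat) (hm : 1 ≤ m')
    (c : Nat) (hc : c < n') (cache : List (List Int))
    (hinv : CacheInv grid m' n' (c + 1) cache) :
    CacheInv grid m' n' c (colBody grid ↑m' ↑n' cache ↑c) := by
  obtain ⟨hlen, hrowlen, hval⟩ := hinv
  have hn : 1 ≤ n' := by omega
  have hm0len : ((PySem.List.pyRange 0 (↑m' : Int) 1).map (fun _ => (0 : Int))).length = m' := by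
    simp [PySem.List.length_pyRange_one]
  have hm0val : ∀ t : Nat, t < m' →
      ((PySem.List.pyRange 0 (↑m' : Int) 1).map (fun _ => (0 : Int))).getD t 0 = 0 := by
    intro t ht
    simp [List.getD_eq_getElem?_getD, PySem.List.getElem?_pyRange_one, ht]
  -- the inner row loop result
  have hMNC : (((PySem.List.pyRange 0 (↑m' : Int) 1).foldl (rowBody grid ↑m' ↑n' cache ↑c)
        ((PySem.List.pyRange 0 (↑m' : Int) 1).map (fun _ => (0 : Int)))).length = m') ∧
      (∀ t : Nat, t < m' →
        ((PySem.List.pyRange 0 (↑m' : Int) 1).foldl (rowBody grid ↑m' ↑n' cache ↑c)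
          ((PySem.List.pyRange 0 (↑m' : Int) 1).map (fun _ => (0 : Int)))).getD t 0
        = if 1 ≤ c then tval grid ↑m' ↑n' ↑c ↑t ↑m' else 0) := by
    by_cases h1c : 1 ≤ c
    · have hcache : ∀ rr : Nat, rr < m' → Gd cache ↑rr ↑c = fB grid ↑m' ↑n' ↑rr ↑c := by
        intro rr hrr
        rw [gd_cast, hval rr c hrr hc, if_pos (by omega)]
      have := mncLoop grid m' n' cache ↑c ⟨by omega, by exact_mod_cast hc⟩ hcache m' 0 (by omega)
        ((PySem.List.pyRange 0 (↑m' : Int) 1).map (fun _ => (0 : Int))) hm0len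
        (fun t ht => by rw [hm0val t ht, Nat.cast_zero, tval_zero])
      rw [Nat.cast_zero] at this
      exact ⟨this.1, fun t ht => by rw [this.2 t ht, if_pos h1c]⟩
    · have hcz : ((c : Nat) : Int) = 0 := by omega
      rw [hcz, PySem.List.foldl_congr_mem _ _ (fun acc _ => acc) _
        (fun acc x _ => rowBody_id grid ↑m' ↑n' cache acc x),
        PySem.List.foldl_ignore]
      exact ⟨hm0len, fun t ht => by rw [hm0val t ht, if_neg h1c]⟩
  obtain ⟨hMl, hMv⟩ := hMNC
  -- the write-back loop
  have hwb := enum_write' ((c : Int) - 1)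
    ((PySem.List.pyRange 0 (↑m' : Int) 1).foldl (rowBody grid ↑m' ↑n' cache ↑c)
      ((PySem.List.pyRange 0 (↑m' : Int) 1).map (fun _ => (0 : Int)))) 0 cache (by omega)
  rw [Nat.cast_zero] at hwb
  obtain ⟨wlen, wval⟩ := hwb
  have hcol : colBody grid ↑m' ↑n' cache ↑c
      = (PySem.List.enumerate ((PySem.List.pyRange 0 (↑m' : Int) 1).foldl
          (rowBody grid ↑m' ↑n' cache ↑c)
          ((PySem.List.pyRange 0 (↑m' : Int) 1).map (fun _ => (0 : Int)))) 0).foldl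
        (fun cache p => PySem.List.pySetD cache p.1
          (PySem.List.pySetD (PySem.List.pyGetD cache p.1 []) ((c : Int) - 1)
            (PySem.List.pyGetD (PySem.List.pyGetD cache p.1 []) ((c : Int) - 1) 0 + p.2))) cache := rfl
  rw [hcol]
  refine ⟨by rw [wlen, hlen], fun r hr => ?_, fun r j hr hj => ?_⟩
  · rw [wval r, if_pos ⟨by omega, by omega⟩, PySem.List.length_pySetD]
    exact hrowlen r hr
  · rw [wval r, if_pos ⟨by omega, by omega⟩, Nat.sub_zero, hMv r hr]
    by_cases h1c : 1 ≤ c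
    · rw [if_pos h1c]
      have hcc : ((c : Nat) : Int) - 1 = ((c - 1 : Nat) : Int) := by omega
      rw [hcc, PySem.List.pySetD_natCast, PySem.List.pyGetD_natCast,
        hval r (c - 1) hr (by omega), if_neg (by omega)]
      by_cases hj1 : j = c - 1
      · subst hj1
        rw [getD_set_self _ _ _ _ (by rw [hrowlen r hr]; omega), if_pos (by omega),
          fB_step grid m' n' r c h1c hc]
      · rw [getD_set_ne _ _ _ _ _ (by omega), hval r j hr hj]
        exact if_congr (by omega) rfl rfl
    · rw [if_neg h1c]
      have hc0 : c = 0 := by omega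
      subst hc0
      have hrne : cache.getD r [] ≠ [] := by
        intro hne
        have := hrowlen r hr
        rw [hne] at this
        simp at this
        omega
      rw [show ((0 : Nat) : Int) - 1 = (-1 : Int) by norm_num,
        PySem.List.pyGetD_neg_one _ _ hrne, add_zero, pySetD_last_self _ hrne,
        hval r j hr hj]
      exact if_congr (by omega) rfl rfl

lemma outerLoop (grid : List (List Int)) (m' n' : Nat) (hm : 1 ≤ m') :
    ∀ k : Nat, k ≤ n' → ∀ cache, CacheInv grid m' n' k cache →
      CacheInv grid m' n' 0
        (((PySem.List.pyRange 0 (↑k : Int) 1).reverse).foldl (colBody grid ↑m' ↑n') cache) := by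
  intro k
  induction k with
  | zero =>
    intro _ cache h
    rw [Nat.cast_zero, PySem.List.pyRange_one_eq_nil le_rfl, List.reverse_nil, List.foldl_nil]
    exact h
  | succ k ih =>
    intro hk cache h
    rw [show ((k + 1 : Nat) : Int) = (k : Int) + 1 by push_cast; ring,
      PySem.List.pyRange_one_succ_right (by omega), List.reverse_append,
      List.reverse_singleton, List.singleton_append, List.foldl_cons]
    exact ih (by omega) _ (colBody_spec grid m' n' hm k (by omega) cache h)

lemma head_getD (grid : List (List Int)) : PySem.List.pyGetD grid 0 [] = grid.headI := by
  rw [PySem.List.pyGetD_zero]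
  cases grid <;> rfl

lemma cache0_inv (grid : List (List Int)) (m' n' : Nat) (hm : 0 < m') (hn : 0 < n') :
    CacheInv grid m' n' n' ((PySem.List.pyRange 0 (↑m' : Int) 1).map
      (fun _ => (PySem.List.pyRange 0 (↑n' : Int) 1).map (fun _ => (1 : Int)))) := by
  have hrow : ∀ r : Nat, r < m' →
      ((PySem.List.pyRange 0 (↑m' : Int) 1).map
        (fun _ => (PySem.List.pyRange 0 (↑n' : Int) 1).map (fun _ => (1 : Int)))).getD r []
      = (PySem.List.pyRange 0 (↑n' : Int) 1).map (fun _ => (1 : Int)) := by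
    intro r hr
    simp [List.getD_eq_getElem?_getD, hr]
  refine ⟨by simp [PySem.List.length_pyRange_one], fun r hr => ?_, fun r j hr hj => ?_⟩
  · rw [hrow r hr]
    simp [PySem.List.length_pyRange_one]
  · rw [hrow r hr]
    have hone : ((PySem.List.pyRange 0 (↑n' : Int) 1).map (fun _ => (1 : Int))).getD j 0 = 1 := by
      simp [List.getD_eq_getElem?_getD, hj]
    rw [hone]
    by_cases hjj : n' ≤ j + 1
    · rw [if_pos hjj, fB, dif_neg (by omega : ¬ ((j : Int) + 1 < ↑n'))]
      norm_num
    · rw [if_neg hjj]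

lemma A_eq (grid : List (List Int)) (h1 : grid ≠ []) (h2 : grid.headI ≠ []) :
    maxMoves grid
      = ((PySem.List.pyRange 1 (↑grid.length : Int) 1).map
          (fun r => fB grid ↑grid.length ↑grid.headI.length r 0)).foldl max
          (fB grid ↑grid.length ↑grid.headI.length 0 0) - 1 := by
  have hm : 0 < grid.length := List.length_pos_iff.mpr h1
  have hn : 0 < grid.headI.length := List.length_pos_iff.mpr h2
  obtain ⟨flen, frows, fvals⟩ := outerLoop grid grid.length grid.headI.length hm
    grid.headI.length le_rfl _ (cache0_inv grid _ _ hm hn)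
  have hA : maxMoves grid
      = (PySem.List.max?
          ((((PySem.List.pyRange 0 (↑grid.headI.length : Int) 1).reverse).foldl
            (colBody grid ↑grid.length ↑grid.headI.length)
            ((PySem.List.pyRange 0 (↑grid.length : Int) 1).map
              (fun _ => (PySem.List.pyRange 0 (↑grid.headI.length : Int) 1).map
                (fun _ => (1 : Int))))).map
            (fun row => PySem.List.pyGetD row 0 0)) (fun x => x)).getD 0 - 1 := by
    simp only [maxMoves, PySem.List.len_eq, head_getD]
    rfl
  rw [hA]
  have hlist : (((PySem.List.pyRange 0 (↑grid.headI.length : Int) 1).reverse).foldl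
        (colBody grid ↑grid.length ↑grid.headI.length)
        ((PySem.List.pyRange 0 (↑grid.length : Int) 1).map
          (fun _ => (PySem.List.pyRange 0 (↑grid.headI.length : Int) 1).map
            (fun _ => (1 : Int))))).map (fun row => PySem.List.pyGetD row 0 0)
      = (PySem.List.pyRange 0 (↑grid.length : Int) 1).map
          (fun r => fB grid ↑grid.length ↑grid.headI.length r 0) := by
    apply List.ext_getElem
    · rw [List.length_map, flen, List.length_map, PySem.List.length_pyRange_one]
      omega
    · intro i hi1 hi2
      have hi : i < grid.length := by
        rw [List.length_map, flen] at hi1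
        exact hi1
      rw [List.getElem_map, List.getElem_map, PySem.List.getElem_pyRange_one,
        PySem.List.pyGetD_zero, ← List.getD_eq_getElem _ [] (by rw [flen]; exact hi)]
      have hrow0 := fvals i 0 hi hn
      rw [if_pos (by omega), Nat.cast_zero] at hrow0
      rw [zero_add, ← hrow0]
  rw [hlist, show PySem.List.pyRange 0 (↑grid.length : Int) 1
      = 0 :: PySem.List.pyRange 1 (↑grid.length : Int) 1 by
      rw [PySem.List.pyRange_one_cons (by exact_mod_cast hm)]; norm_num,
    List.map_cons, PySem.List.max?_id_cons, Option.getD_some]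

lemma B_eq (grid : List (List Int)) (h1 : grid ≠ []) :
    maxMoves_alt grid
      = ((PySem.List.pyRange 1 (↑grid.length : Int) 1).map
          (fun r => fB grid ↑grid.length ↑grid.headI.length r 0)).foldl max
          (fB grid ↑grid.length ↑grid.headI.length 0 0) - 1 := by
  have hm : 0 < grid.length := List.length_pos_iff.mpr h1
  have hB : maxMoves_alt grid
      = (((PySem.List.pyRange 0 (↑grid.length : Int) 1).foldl (fun st r =>
          ((match st.1 with
            | none => some (dfsB grid ↑grid.length ↑grid.headI.length r 0 st.2).1
            | some b => some (max b (dfsB grid ↑grid.length ↑grid.headI.length r 0 st.2).1)),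
            (dfsB grid ↑grid.length ↑grid.headI.length r 0 st.2).2))
          ((none : Option Int), PySem.Dict.empty)).1).getD 0 - 1 := by
    simp only [maxMoves_alt, PySem.List.len_eq, head_getD]
  rw [hB, altLoop grid ↑grid.length ↑grid.headI.length _ _
    (fun r c w hw => by rw [PySem.Dict.get?_empty] at hw; cases hw)]
  rw [show PySem.List.pyRange 0 (↑grid.length : Int) 1
      = 0 :: PySem.List.pyRange 1 (↑grid.length : Int) 1 by
      rw [PySem.List.pyRange_one_cons (by exact_mod_cast hm)]; norm_num,
    List.foldl_cons]
  rw [show ((match (none : Option Int) with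
      | none => some (fB grid (↑grid.length : Int) (↑grid.headI.length : Int) 0 0)
      | some b => some (max b (fB grid (↑grid.length : Int) (↑grid.headI.length : Int) 0 0))) :
        Option Int)
      = some (fB grid (↑grid.length : Int) (↑grid.headI.length : Int) 0 0) from rfl]
  rw [optfold (fun r => fB grid ↑grid.length ↑grid.headI.length r 0)
    (PySem.List.pyRange 1 (↑grid.length : Int) 1)
    (fB grid ↑grid.length ↑grid.headI.length 0 0), Option.getD_some]

-- ===== VERDICT (by name: the statement is the Claim_ definition above) =====
theorem maxMoves_spec : Claim_equal_maxMoves := by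
  intro grid _hdom hpre
  unfold Spec_maxMoves
  rw [A_eq grid hpre.1 hpre.2.1, B_eq grid hpre.1]
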